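-- pv_equiv track=rewrite | github.com/dmshirochenko/algorithmic_trainings | yandex_algo_5_0/part_4/E. Нумерация дробей.py | find_diagonal_binary
-- ===== SOURCE A (Python) =====
-- def find_diagonal_binary(n):
--     left, right = 0, n
--     while left < right:
--         mid = (left + right) // 2
--         if (mid * (mid + 1)) // 2 < n:
--             left = mid + 1
--         else:
--             right = mid
--
--     return left
-- ===== SOURCE B (Python) =====
-- def find_diagonal_binary(n):
--     m, t = 0, 0
--     while t < n:
--         m += 1
--         t += m
--     return m
-- ===== Notes on version B (the rewrite author's own statement) =====
-- stated objective: simpler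
-- what changed: Replaces the binary search over the candidate range by a direct scan that increments the diagonal index while accumulating the running triangular sum, stopping at the first index whose triangular number reaches n.
import Mathlib
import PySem

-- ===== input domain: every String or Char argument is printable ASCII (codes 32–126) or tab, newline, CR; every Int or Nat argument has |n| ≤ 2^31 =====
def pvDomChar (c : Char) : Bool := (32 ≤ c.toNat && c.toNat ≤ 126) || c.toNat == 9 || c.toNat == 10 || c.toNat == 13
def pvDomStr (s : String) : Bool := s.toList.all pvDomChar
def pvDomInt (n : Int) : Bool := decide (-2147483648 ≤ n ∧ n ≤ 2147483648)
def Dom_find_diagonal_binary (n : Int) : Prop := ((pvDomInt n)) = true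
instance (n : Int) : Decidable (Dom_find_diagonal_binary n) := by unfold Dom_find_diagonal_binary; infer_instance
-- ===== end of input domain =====

-- B replaces A's binary search by a plain scan accumulating the triangular sum; objective: simpler.

-- ===== PORT A =====
-- the while-loop of A: left/right shrink until they meet.
-- fuel is a totality guard only: the gap right-left shrinks by ≥ 1 per iteration,
-- so fuel = (right-left).toNat at the call site is enough (proved below).
def pvBsLoop (n : Int) : Nat → Int → Int → Int
  | 0, left, _ => left
  | fuel + 1, left, right =>
    if left < right then
      let mid := PySem.Int.floordiv (left + right) 2
      if PySem.Int.floordiv (mid * (mid + 1)) 2 < n then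
        pvBsLoop n fuel (mid + 1) right
      else
        pvBsLoop n fuel left mid
    else left

def find_diagonal_binary (n : Int) : Int := pvBsLoop n n.toNat 0 n

-- ===== PORT B =====
-- the while-loop of B: m counts diagonals, t = m*(m+1)/2 is the running triangular sum
-- (m and t start at 0 and only grow, so they are carried as Nat).
-- fuel is a totality guard only: t grows by ≥ 1 per iteration and the loop stops once t ≥ n,
-- so fuel = n.toNat at the call site is enough (proved below).
def pvScanLoop (n : Int) : Nat → Nat → Nat → Int
  | 0, m, _ => m
  | fuel + 1, m, t => if (t : Int) < n then pvScanLoop n fuel (m + 1) (t + (m + 1)) else (m : Int)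

def find_diagonal_binary_alt (n : Int) : Int := pvScanLoop n n.toNat 0 0

-- ===== PRECONDITION & SPEC =====
def Spec_find_diagonal_binary (n : Int) (out : Int) : Prop := out = find_diagonal_binary_alt n
instance (n : Int) (out : Int) : Decidable (Spec_find_diagonal_binary n out) := by unfold Spec_find_diagonal_binary; infer_instance

-- ===== CLAIM (what is proved, stated in full; the proofs are below) =====
def Claim_equal_find_diagonal_binary : Prop := ∀ (n : Int), Dom_find_diagonal_binary n → Spec_find_diagonal_binary n (find_diagonal_binary n)

-- ===== LEMMAS AND PROOFS =====

-- both loops return the unique index whose predecessor triangular number is below n and whose own triangular number reaches n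

theorem pv_least_unique (n a b : Int)
    (ha1 : (a - 1) * a < 2 * n) (ha2 : 2 * n ≤ a * (a + 1))
    (hb1 : (b - 1) * b < 2 * n) (hb2 : 2 * n ≤ b * (b + 1)) : a = b := by
  by_contra hne
  rcases lt_or_gt_of_ne hne with h | h
  · have : a * (a + 1) ≤ (b - 1) * b := by nlinarith
    omega
  · have : b * (b + 1) ≤ (a - 1) * a := by nlinarith
    omega

theorem pvBsLoop_correct (n : Int) :
    ∀ fuel : Nat, ∀ l r : Int, (r - l).toNat ≤ fuel → 0 ≤ l → l ≤ r →
      (l - 1) * l < 2 * n → 2 * n ≤ r * (r + 1) →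
      (pvBsLoop n fuel l r - 1) * pvBsLoop n fuel l r < 2 * n ∧
        2 * n ≤ pvBsLoop n fuel l r * (pvBsLoop n fuel l r + 1) := by
  intro fuel
  induction fuel with
  | zero =>
    intro l r hk hl0 hlr hl hr
    have : l = r := by omega
    subst this
    exact ⟨hl, hr⟩
  | succ fuel ih =>
    intro l r hk hl0 hlr hl hr
    rw [pvBsLoop]
    by_cases hlt : l < r
    · rw [if_pos hlt]
      have hmid := PySem.Int.floordiv_two_mid_bounds (le_of_lt hlt)
      have hmlt : PySem.Int.floordiv (l + r) 2 < r :=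
        (PySem.Int.floordiv_lt_iff_lt_mul (by norm_num)).mpr (by omega)
      set mid := PySem.Int.floordiv (l + r) 2 with hmiddef
      by_cases hcond : PySem.Int.floordiv (mid * (mid + 1)) 2 < n
      · rw [if_pos hcond]
        have hcond' : mid * (mid + 1) < 2 * n := by
          have := (PySem.Int.floordiv_lt_iff_lt_mul (a := mid * (mid + 1)) (b := 2) (q := n)
            (by norm_num)).mp hcond
          linarith
        exact ih (mid + 1) r (by omega) (by omega) (by omega) (by simpa using hcond') hr
      · rw [if_neg hcond]
        have hcond' : 2 * n ≤ mid * (mid + 1) := by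
          have := (PySem.Int.floordiv_lt_iff_lt_mul (a := mid * (mid + 1)) (b := 2) (q := n)
            (by norm_num)).not.mp hcond
          omega
        exact ih l mid (by omega) hl0 (by omega) hl (by linarith)
    · rw [if_neg hlt]
      have : l = r := by omega
      subst this
      exact ⟨hl, hr⟩

theorem pvScanLoop_correct (n : Int) :
    ∀ fuel : Nat, ∀ m t : Nat, (n - t).toNat ≤ fuel → 2 * (t : Int) = m * (m + 1) →
      ((m : Int) - 1) * m < 2 * n →
      (pvScanLoop n fuel m t - 1) * pvScanLoop n fuel m t < 2 * n ∧
        2 * n ≤ pvScanLoop n fuel m t * (pvScanLoop n fuel m t + 1) := by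
  intro fuel
  induction fuel with
  | zero =>
    intro m t hk hinv hless
    rw [pvScanLoop]
    refine ⟨by simpa using hless, ?_⟩
    have ht : n ≤ (t : Int) := by omega
    nlinarith
  | succ fuel ih =>
    intro m t hk hinv hless
    rw [pvScanLoop]
    by_cases hlt : (t : Int) < n
    · rw [if_pos hlt]
      refine ih (m + 1) (t + (m + 1)) (by omega) ?_ ?_
      · push_cast
        ring_nf
        ring_nf at hinv
        omega
      · push_cast
        nlinarith
    · rw [if_neg hlt]
      refine ⟨by simpa using hless, ?_⟩
      have ht : n ≤ (t : Int) := by omega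
      nlinarith

theorem pv_loops_agree (n : Int) : pvBsLoop n n.toNat 0 n = pvScanLoop n n.toNat 0 0 := by
  by_cases hn : 1 ≤ n
  · have hA := pvBsLoop_correct n n.toNat 0 n (by omega) (le_refl 0) (by omega)
      (by norm_num; omega) (by nlinarith)
    have hB := pvScanLoop_correct n n.toNat 0 0 (by omega) (by norm_num) (by norm_num; omega)
    exact pv_least_unique n _ _ hA.1 hA.2 hB.1 hB.2
  · have hz : n.toNat = 0 := by omega
    rw [hz, pvBsLoop, pvScanLoop]
    norm_num

-- ===== VERDICT (by name: the statement is the Claim_ definition above) =====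
theorem find_diagonal_binary_spec : Claim_equal_find_diagonal_binary := by
  intro n _
  unfold Spec_find_diagonal_binary find_diagonal_binary find_diagonal_binary_alt
  exact pv_loops_agree n
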